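-- pv_equiv track=rewrite | github.com/Syharik3316/SyharikTS | backend/app/services/file_parser.py | _disambiguate_docx_headers
-- ===== SOURCE A (Python) =====
-- from typing import Any, Dict, List, Optional, Tuple
--
-- def _disambiguate_docx_headers(headers: List[str]) -> List[str]:
--     out: List[str] = []
--     counts: Dict[str, int] = {}
--     for i, h in enumerate(headers):
--         base = (str(h or "").strip()) or f"col_{i + 1}"
--         n = counts.get(base, 0)
--         counts[base] = n + 1
--         out.append(base if n == 0 else f"{base}::{n}")
--     return out
-- ===== SOURCE B (Python) =====
-- def _disambiguate_docx_headers(headers):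
--     groups = {}
--     for i, h in enumerate(headers):
--         base = (str(h or "").strip()) or f"col_{i + 1}"
--         groups.setdefault(base, []).append(i)
--     out = [None] * len(headers)
--     for base, positions in groups.items():
--         for k, pos in enumerate(positions):
--             out[pos] = base if k == 0 else f"{base}::{k}"
--     return out
-- ===== Notes on version B (the rewrite author's own statement) =====
-- stated objective: alternative
-- what changed: Replaces A's single left-to-right pass with a running name->count dict by a group-and-scatter scheme: a first pass groups the positions of each normalised base name into a dict of position lists, then a second pass walks the groups and writes each occurrence's disambiguated name out of order into a preallocated output array.
import Mathlib
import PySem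

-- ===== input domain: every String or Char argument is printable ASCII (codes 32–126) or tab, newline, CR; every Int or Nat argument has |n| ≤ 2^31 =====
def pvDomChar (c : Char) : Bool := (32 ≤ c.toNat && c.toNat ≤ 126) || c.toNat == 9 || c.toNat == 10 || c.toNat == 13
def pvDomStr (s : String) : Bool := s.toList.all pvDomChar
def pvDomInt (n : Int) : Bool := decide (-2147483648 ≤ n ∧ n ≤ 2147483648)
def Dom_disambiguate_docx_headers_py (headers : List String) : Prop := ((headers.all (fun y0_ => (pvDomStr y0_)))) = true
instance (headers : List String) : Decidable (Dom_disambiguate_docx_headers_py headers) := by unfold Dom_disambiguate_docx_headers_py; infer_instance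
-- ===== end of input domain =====

-- B replaces A's single pass with a running name->count dict by group-and-scatter:
-- first group each base name's positions in a dict of lists, then write every
-- occurrence's disambiguated name out of order into a preallocated output array
-- (alternative decomposition, same asymptotic cost).

-- ===== PORT A =====
-- base = (str(h or "").strip()) or f"col_{i + 1}"   (h or "" is h for nonempty h, "" otherwise)
def pvBase (i : Int) (h : String) : String :=
  let s := PySem.Str.strip (if h == "" then "" else h)
  if s == "" then "col_" ++ PySem.Int.toStr (i + 1) else s

-- base if n == 0 else f"{base}::{n}"
def pvRender (b : String) (n : Int) : String :=
  if n == 0 then b else b ++ "::" ++ PySem.Int.toStr n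

-- loop body of A: n = counts.get(base, 0); counts[base] = n + 1; out.append(...)
def pvStepA (st : List String × PySem.Dict String Int) (p : Int × String) :
    List String × PySem.Dict String Int :=
  let base := pvBase p.1 p.2
  let n := st.2.getD base 0
  (st.1 ++ [pvRender base n], st.2.insert base (n + 1))

def disambiguate_docx_headers_py (headers : List String) : List String :=
  ((PySem.List.enumerate headers).foldl pvStepA ([], PySem.Dict.empty)).1

-- ===== PORT B =====
-- first loop body of B: groups.setdefault(base, []).append(i)
def pvStepB (d : PySem.Dict String (List Int)) (p : Int × String) : PySem.Dict String (List Int) :=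
  d.modify (pvBase p.1 p.2) [] (· ++ [p.1])

def disambiguate_docx_headers_py_alt (headers : List String) : List String :=
  let groups := (PySem.List.enumerate headers).foldl pvStepB PySem.Dict.empty
  -- out = [None] * len(headers); "" stands for None — every slot is overwritten below
  let init : List String := List.replicate headers.length ""
  groups.items.foldl
    (fun out bp =>
      (PySem.List.enumerate bp.2).foldl
        (fun out2 kp => PySem.List.pySetD out2 kp.2 (pvRender bp.1 kp.1)) out)
    init

-- ===== PRECONDITION & SPEC =====
def Spec_disambiguate_docx_headers_py (headers : List String) (out : List String) : Prop := out = disambiguate_docx_headers_py_alt headers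
instance (headers : List String) (out : List String) : Decidable (Spec_disambiguate_docx_headers_py headers out) := by unfold Spec_disambiguate_docx_headers_py; infer_instance

-- ===== CLAIM (what is proved, stated in full; the proofs are below) =====
def Claim_equal_disambiguate_docx_headers_py : Prop := ∀ (headers : List String), Dom_disambiguate_docx_headers_py headers → Spec_disambiguate_docx_headers_py headers (disambiguate_docx_headers_py headers)

-- ===== LEMMAS AND PROOFS =====

-- canonical form both ports are reduced to: pre = bases already processed, bs = bases to come
def pvSpec2 : List String → List String → List String
  | _, [] => []
  | pre, b :: bs => pvRender b (pre.count b) :: pvSpec2 (pre ++ [b]) bs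

theorem pvStepA_eq (st : List String × PySem.Dict String Int) (p : Int × String) :
    pvStepA st p = (st.1 ++ [pvRender (pvBase p.1 p.2) (st.2.getD (pvBase p.1 p.2) 0)],
      st.2.insert (pvBase p.1 p.2) (st.2.getD (pvBase p.1 p.2) 0 + 1)) := rfl

theorem pvA_foldl (l : List (Int × String)) (pre acc : List String) (d : PySem.Dict String Int)
    (hd : ∀ x, d.getD x 0 = (pre.count x : Int)) :
    (l.foldl pvStepA (acc, d)).1 = acc ++ pvSpec2 pre (l.map (fun p => pvBase p.1 p.2)) := by
  induction l generalizing pre acc d with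
  | nil => simp [pvSpec2]
  | cons p l ih =>
    simp only [List.foldl_cons, List.map_cons, pvSpec2, pvStepA_eq]
    rw [ih (pre ++ [pvBase p.1 p.2]) _ _ ?_]
    · simp [hd]
    · intro x
      rw [PySem.Dict.getD_insert]
      by_cases hx : x = pvBase p.1 p.2
      · subst hx; simp [hd]
      · have : List.count x [pvBase p.1 p.2] = 0 := by
          simp [List.count_singleton']
          exact fun h => hx h.symm
        simp [hx, hd x, List.count_append, this]

-- length and element characterisation of the canonical form
theorem pvSpec2_length (pre bs : List String) : (pvSpec2 pre bs).length = bs.length := by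
  induction bs generalizing pre with
  | nil => rfl
  | cons b bs ih => simp [pvSpec2, ih]

theorem pvSpec2_getElem? (pre bs : List String) (t : Nat) (ht : t < bs.length) :
    (pvSpec2 pre bs)[t]? = some (pvRender bs[t] (((pre ++ bs.take t).count bs[t] : Nat) : Int)) := by
  induction bs generalizing pre t with
  | nil => simp at ht
  | cons b bs ih =>
    cases t with
    | zero => simp [pvSpec2]
    | succ t =>
      simp only [List.length_cons] at ht
      simp only [pvSpec2, List.getElem?_cons_succ]
      rw [ih (pre ++ [b]) t (by omega)]
      simp [List.append_assoc]

-- ---------- B side ----------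

-- the scatter write: out[pos] = v
def pvW (o : List String) (pv : Nat × String) : List String := o.set pv.1 pv.2

-- every write writes the target's value at its position ⇒ the fold realises the target on the written positions
theorem pvW_foldl_getElem? (ws : List (Nat × String)) (init tgt : List String)
    (hlen : init.length = tgt.length)
    (hval : ∀ pv ∈ ws, pv.1 < tgt.length ∧ tgt[pv.1]? = some pv.2) (i : Nat) :
    (ws.foldl pvW init)[i]? = if ws.any (fun pv => pv.1 == i) then tgt[i]? else init[i]? := by
  induction ws generalizing init with
  | nil => simp
  | cons pv ws ih =>
    obtain ⟨hp1, hp2⟩ := hval pv (by simp)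
    rw [List.foldl_cons]
    rw [ih (pvW init pv) (by simpa [pvW] using hlen) (fun q hq => hval q (by simp [hq]))]
    by_cases hany : ws.any (fun pv => pv.1 == i)
    · simp [hany]
    · by_cases hpi : pv.1 = i
      · subst hpi
        simp [hany, pvW, List.getElem?_set_self (hlen ▸ hp1), hp2]
      · simp [hany, pvW, List.getElem?_set_ne hpi, hpi]

-- bases with their indices, starting at s
def pvBases (s : Int) (headers : List String) : List String :=
  (PySem.List.enumerate headers s).map (fun p => pvBase p.1 p.2)

-- indices of base c among bases bs indexed from s, in order
def pvIdxs (s : Int) (bs : List String) (c : String) : List Int :=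
  ((PySem.List.enumerate bs s).filter (fun q => q.2 == c)).map (·.1)

theorem pvIdxs_cons (s : Int) (b : String) (bs : List String) (c : String) :
    pvIdxs s (b :: bs) c = (if b == c then [s] else []) ++ pvIdxs (s + 1) bs c := by
  by_cases h : b = c <;>
    simp [pvIdxs, PySem.List.enumerate_cons, h]

-- the k-th recorded position of c is an index t with bs[t] = c and exactly k earlier c's
theorem pvIdxs_spec (bs : List String) (c : String) : ∀ (a k : Nat) (pos : Int),
    (pvIdxs (a : Int) bs c)[k]? = some pos →
    ∃ t : Nat, pos = ((a + t : Nat) : Int) ∧ ∃ ht : t < bs.length,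
      bs[t] = c ∧ (bs.take t).count c = k := by
  induction bs with
  | nil => intro a k pos h; simp [pvIdxs] at h
  | cons b bs ih =>
    intro a k pos h
    rw [pvIdxs_cons, show ((a : Int)) + 1 = ((a + 1 : Nat) : Int) by push_cast; ring] at h
    by_cases hb : b = c
    · subst hb
      simp only [BEq.rfl, if_true] at h
      cases k with
      | zero =>
        simp at h
        exact ⟨0, by simpa using h.symm, by simp, rfl, by simp⟩
      | succ k =>
        rw [List.getElem?_append_right (by simp)] at h
        simp only [List.length_singleton, Nat.add_sub_cancel] at h
        obtain ⟨t, hpos, ht, hc, hcnt⟩ := ih (a + 1) k pos h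
        exact ⟨t + 1, by push_cast at hpos ⊢; omega, by simpa using Nat.succ_lt_succ ht,
          by simpa using hc, by simp [hcnt]⟩
    · simp only [beq_eq_false_iff_ne.mpr hb] at h
      obtain ⟨t, hpos, ht, hc, hcnt⟩ := ih (a + 1) k pos h
      refine ⟨t + 1, by push_cast at hpos ⊢; omega, by simpa using Nat.succ_lt_succ ht,
        by simpa using hc, ?_⟩
      simp [hcnt, hb]

-- membership: every index of c in bs is recorded
theorem mem_pvIdxs (bs : List String) (c : String) (a t : Nat) (ht : t < bs.length)
    (hc : bs[t] = c) : ((a + t : Nat) : Int) ∈ pvIdxs (a : Int) bs c := by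
  induction bs generalizing a t with
  | nil => simp at ht
  | cons b bs ih =>
    rw [pvIdxs_cons, show ((a : Int)) + 1 = ((a + 1 : Nat) : Int) by push_cast; ring]
    cases t with
    | zero =>
      simp at hc; subst hc
      simp
    | succ t =>
      simp only [List.length_cons] at ht
      have := ih (a + 1) t (by omega) (by simpa using hc)
      refine List.mem_append.mpr (Or.inr ?_)
      have e : ((a + (t + 1) : Nat) : Int) = (((a + 1) + t : Nat) : Int) := by push_cast; ring
      rw [e]
      exact this

-- the grouping fold, rewritten over (base, index) pairs
theorem pvGroups_eq (headers : List String) (s : Int) (d : PySem.Dict String (List Int)) :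
    (PySem.List.enumerate headers s).foldl pvStepB d =
      (((PySem.List.enumerate headers s).map (fun p => (pvBase p.1 p.2, p.1))).foldl
        (fun d q => d.modify q.1 [] (· ++ [q.2])) d) := by
  rw [List.foldl_map]
  rfl

-- the (base, index) pairs are the enumerated bases, swapped
theorem pvPairs_eq (headers : List String) (s : Int) :
    (PySem.List.enumerate headers s).map (fun p => (pvBase p.1 p.2, p.1)) =
      (PySem.List.enumerate (pvBases s headers) s).map (fun q => (q.2, q.1)) := by
  induction headers generalizing s with
  | nil => simp [pvBases, PySem.List.enumerate_nil]
  | cons h hs ih => simp [pvBases, PySem.List.enumerate_cons, ih (s + 1)]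

-- value stored under c = the recorded index list of c
theorem pvGroups_getD (headers : List String) (c : String) :
    ((PySem.List.enumerate headers).foldl pvStepB PySem.Dict.empty).getD c [] =
      pvIdxs 0 (pvBases 0 headers) c := by
  rw [pvGroups_eq, pvPairs_eq]
  rw [PySem.Dict.getD_foldl_modify_append]
  simp [pvIdxs, List.filter_map, Function.comp_def]

-- keys of the grouping dict = the distinct bases, in first-occurrence order
theorem pvGroups_keys (headers : List String) :
    ((PySem.List.enumerate headers).foldl pvStepB PySem.Dict.empty).keys =
      PySem.Set.ofList (pvBases 0 headers) := by
  rw [pvGroups_eq, pvPairs_eq]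
  rw [PySem.Dict.keys_foldl_modify_key (key := Prod.fst)]
  simp only [PySem.Dict.keys_empty, PySem.Set.update_nil_left, List.map_map]
  have : ((fun q : Int × String => (q.2, q.1)) · |>.1) = fun q : Int × String => q.2 := rfl
  simp [Function.comp_def, PySem.List.map_snd_enumerate]

theorem pvGroups_keys_nodup (headers : List String) :
    ((PySem.List.enumerate headers).foldl pvStepB PySem.Dict.empty).keys.Nodup := by
  rw [pvGroups_eq]
  exact PySem.Dict.nodup_keys_foldl_modify_key _ _ _ _ _ PySem.Dict.nodup_keys_empty

-- items of the grouping dict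
theorem pvGroups_items (headers : List String) :
    ((PySem.List.enumerate headers).foldl pvStepB PySem.Dict.empty).items =
      (PySem.Set.ofList (pvBases 0 headers)).map (fun c => (c, pvIdxs 0 (pvBases 0 headers) c)) := by
  rw [PySem.Dict.items_eq_map_keys _ (pvGroups_keys_nodup headers) ([] : List Int)]
  rw [pvGroups_keys]
  exact List.map_congr_left (fun c _ => by rw [pvGroups_getD])

-- the whole scatter pass as one flat write list
theorem pvScatter_eq (items : List (String × List Int)) (init : List String)
    (hpos : ∀ bp ∈ items, ∀ pos ∈ bp.2, 0 ≤ pos) :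
    items.foldl
      (fun out bp =>
        (PySem.List.enumerate bp.2).foldl
          (fun out2 kp => PySem.List.pySetD out2 kp.2 (pvRender bp.1 kp.1)) out)
      init =
    (items.flatMap (fun bp =>
        (PySem.List.enumerate bp.2).map (fun kp => (kp.2.toNat, pvRender bp.1 kp.1)))).foldl
      pvW init := by
  induction items generalizing init with
  | nil => rfl
  | cons bp items ih =>
    simp only [List.foldl_cons, List.flatMap_cons, List.foldl_append]
    rw [ih _ (fun q hq => hpos q (by simp [hq]))]
    congr 1
    rw [List.foldl_map]
    refine PySem.List.foldl_congr_mem' _ _ _ _ (fun kp hkp acc => ?_)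
    have h2 : kp.2 ∈ bp.2 := by
      obtain ⟨k, hk, rfl⟩ := (PySem.List.mem_enumerate_iff _ _ _).mp hkp
      exact List.getElem_mem hk
    have h0 : 0 ≤ kp.2 := hpos bp (by simp) kp.2 h2
    rw [PySem.List.pySetD_of_nonneg acc _ h0]; rfl

theorem pvBases_length (headers : List String) : (pvBases 0 headers).length = headers.length := by
  simp [pvBases]

theorem pvIdxs_nonneg (bs : List String) (c : String) : ∀ pos ∈ pvIdxs 0 bs c, 0 ≤ pos := by
  intro pos hpos
  obtain ⟨k, hk, hgk⟩ := List.getElem_of_mem hpos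
  have hg : (pvIdxs ((0 : Nat) : Int) bs c)[k]? = some pos := by
    simpa [List.getElem?_eq_getElem hk] using congrArg some hgk
  obtain ⟨t, hpos', -⟩ := pvIdxs_spec bs c 0 k pos hg
  simp [hpos']

theorem pvB_eq_spec2 (headers : List String) :
    disambiguate_docx_headers_py_alt headers = pvSpec2 [] (pvBases 0 headers) := by
  have step1 : disambiguate_docx_headers_py_alt headers =
      (((PySem.List.enumerate headers).foldl pvStepB PySem.Dict.empty).items).foldl
        (fun out bp => (PySem.List.enumerate bp.2).foldl
          (fun out2 kp => PySem.List.pySetD out2 kp.2 (pvRender bp.1 kp.1)) out)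
        (List.replicate headers.length "") := rfl
  set bs := pvBases 0 headers with hbs
  have hn : bs.length = headers.length := pvBases_length headers
  have hpos : ∀ bp ∈ (PySem.Set.ofList bs).map (fun c => (c, pvIdxs 0 bs c)),
      ∀ pos ∈ bp.2, 0 ≤ pos := by
    intro bp hbp pos hp
    obtain ⟨c, -, rfl⟩ := List.mem_map.mp hbp
    exact pvIdxs_nonneg bs c pos hp
  rw [step1, pvGroups_items, pvScatter_eq _ _ hpos]
  set tgt := pvSpec2 [] bs with htgt
  have hlent : tgt.length = headers.length := by rw [htgt, pvSpec2_length]; exact hn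
  have hlen : (List.replicate headers.length "").length = tgt.length := by
    simp [hlent]
  set ws := ((PySem.Set.ofList bs).map (fun c => (c, pvIdxs 0 bs c))).flatMap
      (fun bp => (PySem.List.enumerate bp.2).map (fun kp => (kp.2.toNat, pvRender bp.1 kp.1)))
    with hws
  have hval : ∀ pv ∈ ws, pv.1 < tgt.length ∧ tgt[pv.1]? = some pv.2 := by
    intro pv hpv
    obtain ⟨bp, hbp, hpv2⟩ := List.mem_flatMap.mp hpv
    obtain ⟨c, hcmem, rfl⟩ := List.mem_map.mp hbp
    obtain ⟨kp, hkp, rfl⟩ := List.mem_map.mp hpv2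
    obtain ⟨k, hk, rfl⟩ := (PySem.List.mem_enumerate_iff _ _ _).mp hkp
    have hg : (pvIdxs ((0 : Nat) : Int) bs c)[k]? = some ((pvIdxs 0 bs c)[k]) := by
      simp [List.getElem?_eq_getElem hk]
    obtain ⟨t, hpos', ht, hcc, hcnt⟩ := pvIdxs_spec bs c 0 k _ hg
    have h1 : ((pvIdxs 0 bs c)[k]).toNat = t := by simp [hpos']
    refine ⟨by rw [h1]; omega, ?_⟩
    rw [h1, htgt, pvSpec2_getElem? [] bs t ht]
    simp [hcc, hcnt]
  apply List.ext_getElem?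
  intro i
  rw [pvW_foldl_getElem? ws _ tgt hlen hval i]
  by_cases hi : i < headers.length
  · have hib : i < bs.length := by omega
    have hcmem : bs[i] ∈ PySem.Set.ofList bs :=
      (PySem.Set.mem_ofList _ _).mpr (List.getElem_mem hib)
    have hm : ((0 + i : Nat) : Int) ∈ pvIdxs ((0 : Nat) : Int) bs (bs[i]) :=
      mem_pvIdxs bs (bs[i]) 0 i hib rfl
    have hm' : ((i : Nat) : Int) ∈ pvIdxs 0 bs (bs[i]) := by simpa using hm
    obtain ⟨k, hk, hgk⟩ := List.getElem_of_mem hm'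
    have hany : ws.any (fun pv => pv.1 == i) = true := by
      refine List.any_eq_true.mpr ⟨(((pvIdxs 0 bs (bs[i]))[k]).toNat, pvRender (bs[i]) (0 + (k : Int))), ?_, ?_⟩
      · refine List.mem_flatMap.mpr ⟨(bs[i], pvIdxs 0 bs (bs[i])), List.mem_map.mpr ⟨bs[i], hcmem, rfl⟩, ?_⟩
        exact List.mem_map.mpr ⟨((0 : Int) + (k : Int), (pvIdxs 0 bs (bs[i]))[k]),
          (PySem.List.mem_enumerate_iff _ _ _).mpr ⟨k, hk, rfl⟩, rfl⟩
      · simp [hgk]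
    rw [if_pos hany]
  · have hany : ws.any (fun pv => pv.1 == i) = false := by
      refine List.any_eq_false.mpr (fun pv hpv => ?_)
      have h1 := (hval pv hpv).1
      simp only [beq_iff_eq]
      omega
    rw [if_neg (by simp [hany])]
    rw [List.getElem?_eq_none (by simpa using Nat.le_of_not_lt hi),
        List.getElem?_eq_none (by omega)]

-- ===== VERDICT (by name: the statement is the Claim_ definition above) =====
theorem disambiguate_docx_headers_py_spec : Claim_equal_disambiguate_docx_headers_py := by
  intro headers _
  unfold Spec_disambiguate_docx_headers_py disambiguate_docx_headers_py
  rw [pvA_foldl _ [] [] _ (fun x => by simp), pvB_eq_spec2]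
  rfl
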